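-- pv_equiv track=rewrite | github.com/Gerhard-B-Work/Unittests | code_tester.py | generate_expected_full_map
-- ===== SOURCE A (Python) =====
-- def generate_expected_full_map(map_size, entities):
--     """ Utility method to generate the expected full map output with entities """
--     output = []
--     # Generate top coordinate row
--     top_num_row = '    ' + ' '.join(f'{i:03}' for i in range(map_size))
--     output.append(top_num_row)
--
--     # Generate grid lines and coordinate labels
--     for row in range(map_size - 1, -1, -1):  # Generate rows from bottom to top
--         separator = '   +' + '---+' * map_size
--         output.append(separator)
--
--         side_num = f'{row:03}'
--         row_content = f'{side_num}|'
--         for col in range(map_size):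
--             if (row, col) in entities:
--                 entity_icon = entities[(row, col)]
--                 row_content += f' {entity_icon} |'
--             else:
--                 row_content += '   |'
--         output.append(row_content)
--
--     # Final border line
--     output.append('   +' + '---+' * map_size)
--     return '\n'.join(output)  # Join lines to form full map
-- ===== SOURCE B (Python) =====
-- def generate_expected_full_map(map_size, entities):
--     n = map_size if map_size > 0 else 0
--     by_row = {}
--     for (r, c), icon in entities.items():
--         if 0 <= r < n and 0 <= c < n:
--             by_row.setdefault(r, {})[c] = icon
--     sep = '   +' + '---+' * n
--     lines = ['    ' + ' '.join(f'{i:03}' for i in range(n))]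
--     for r in range(n - 1, -1, -1):
--         cells = by_row.get(r, {})
--         parts = [f'{r:03}|']
--         prev = 0
--         for c in sorted(cells):
--             parts.append('   |' * (c - prev))
--             parts.append(f' {cells[c]} |')
--             prev = c + 1
--         parts.append('   |' * (n - prev))
--         lines.append(sep)
--         lines.append(''.join(parts))
--     lines.append(sep)
--     return '\n'.join(lines)
-- ===== Notes on version B (the rewrite author's own statement) =====
-- stated objective: alternative
-- what changed: B groups the entity dict by row and renders each row line by sorting that row's occupied columns and emitting runs of blank cells between them, instead of A's per-cell dict membership test and lookup over every grid cell.
import Mathlib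
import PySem

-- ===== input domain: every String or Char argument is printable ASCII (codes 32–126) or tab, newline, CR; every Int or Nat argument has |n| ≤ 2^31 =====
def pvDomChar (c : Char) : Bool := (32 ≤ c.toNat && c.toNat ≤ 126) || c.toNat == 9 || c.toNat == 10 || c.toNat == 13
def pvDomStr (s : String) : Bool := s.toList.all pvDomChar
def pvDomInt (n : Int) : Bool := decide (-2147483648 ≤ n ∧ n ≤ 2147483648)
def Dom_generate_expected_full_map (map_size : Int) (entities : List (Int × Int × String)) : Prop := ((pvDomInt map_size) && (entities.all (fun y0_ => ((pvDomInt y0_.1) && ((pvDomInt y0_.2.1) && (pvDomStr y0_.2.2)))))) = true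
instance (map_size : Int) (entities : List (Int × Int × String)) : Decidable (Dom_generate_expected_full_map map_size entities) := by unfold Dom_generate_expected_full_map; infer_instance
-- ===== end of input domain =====

-- B groups the sparse entity dict by row and renders each row line by sorting that row's
-- columns and emitting blank-cell runs between them, instead of A's per-cell dict lookup
-- over every grid cell (alternative decomposition; return value only, no mutation).

-- shared formatting helpers: f'{i:03}' (exact: str(i).zfill(3)) and ''.join
def pvPad3 (i : Int) : String := PySem.Str.zfill (PySem.Int.toStr i) 3

def pvConcat : List String → String
  | [] => ""
  | s :: rest => s ++ pvConcat rest

-- the Python argument is a dict keyed by (row, col); the association list IS that dict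
def pvDict (entities : List (Int × Int × String)) : PySem.Dict (Int × Int) String :=
  PySem.Dict.ofList (entities.map (fun e => ((e.1, e.2.1), e.2.2)))

-- ===== PORT A =====
def generate_expected_full_map (map_size : Int) (entities : List (Int × Int × String)) : String :=
  let d := pvDict entities
  let top_num_row := "    " ++ PySem.Str.join " " ((PySem.List.pyRange 0 map_size 1).map (fun i => pvPad3 i))
  let output := [top_num_row]
  let output := (PySem.List.pyRange (map_size - 1) (-1) (-1)).foldl (fun output row =>
    let separator := "   +" ++ pvConcat (List.replicate map_size.toNat "---+")
    let output := output ++ [separator]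
    let row_content := (PySem.List.pyRange 0 map_size 1).foldl (fun rc col =>
      if d.contains (row, col) then
        rc ++ (" " ++ d.getD (row, col) "" ++ " |")
      else
        rc ++ "   |") (pvPad3 row ++ "|")
    output ++ [row_content]) output
  let output := output ++ ["   +" ++ pvConcat (List.replicate map_size.toNat "---+")]
  PySem.Str.join "\n" output

-- ===== PORT B =====
-- '   |' * k  (empty for k ≤ 0, as in Python)
def pvBlank (k : Int) : String := pvConcat (List.replicate k.toNat "   |")

-- by_row grouping loop: by_row.setdefault(r, {})[c] = icon for each in-range dict item
def pvByRow (n : Int) (d : PySem.Dict (Int × Int) String) : PySem.Dict Int (PySem.Dict Int String) :=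
  d.items.foldl (fun br kv =>
    if 0 ≤ kv.1.1 ∧ kv.1.1 < n ∧ 0 ≤ kv.1.2 ∧ kv.1.2 < n then
      br.modify kv.1.1 PySem.Dict.empty (fun m => m.insert kv.1.2 kv.2)
    else br) PySem.Dict.empty

-- one row line: label, then blank runs between the row's sorted columns
def pvRowLine (n r : Int) (cells : PySem.Dict Int String) : String :=
  let res := (PySem.List.sorted cells.keys (fun x => x)).foldl
    (fun (acc : List String × Int) c =>
      (acc.1 ++ [pvBlank (c - acc.2), " " ++ cells.getD c "" ++ " |"], c + 1))
    ([pvPad3 r ++ "|"], 0)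
  pvConcat (res.1 ++ [pvBlank (n - res.2)])

def generate_expected_full_map_alt (map_size : Int) (entities : List (Int × Int × String)) : String :=
  let n : Int := if map_size > 0 then map_size else 0
  let br := pvByRow n (pvDict entities)
  let sep := "   +" ++ pvConcat (List.replicate n.toNat "---+")
  let lines := ["    " ++ PySem.Str.join " " ((PySem.List.pyRange 0 n 1).map (fun i => pvPad3 i))]
  let lines := (PySem.List.pyRange (n - 1) (-1) (-1)).foldl
    (fun ls r => ls ++ [sep, pvRowLine n r (br.getD r PySem.Dict.empty)]) lines
  PySem.Str.join "\n" (lines ++ [sep])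

-- ===== PRECONDITION & SPEC =====
def Spec_generate_expected_full_map (map_size : Int) (entities : List (Int × Int × String)) (out : String) : Prop := out = generate_expected_full_map_alt map_size entities
instance (map_size : Int) (entities : List (Int × Int × String)) (out : String) : Decidable (Spec_generate_expected_full_map map_size entities out) := by unfold Spec_generate_expected_full_map; infer_instance

-- ===== CLAIM (what is proved, stated in full; the proofs are below) =====
def Claim_equal_generate_expected_full_map : Prop := ∀ (map_size : Int) (entities : List (Int × Int × String)), Dom_generate_expected_full_map map_size entities → Spec_generate_expected_full_map map_size entities (generate_expected_full_map map_size entities)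

-- ===== LEMMAS AND PROOFS =====

-- the cell string A produces at (ri, ci)
def pvCell (d : PySem.Dict (Int × Int) String) (ri ci : Int) : String :=
  if d.contains (ri, ci) then " " ++ d.getD (ri, ci) "" ++ " |" else "   |"

-- last-match lookup in a raw item list (= what B's grouping loop stores per key)
def pvFind (l : List ((Int × Int) × String)) (k : Int × Int) : Option String :=
  l.foldl (fun acc kv => if kv.1 = k then some kv.2 else acc) none

-- B's grouping fold over an arbitrary prefix of the item list
def pvByRowL (n : Int) (l : List ((Int × Int) × String)) : PySem.Dict Int (PySem.Dict Int String) :=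
  l.foldl (fun br kv =>
    if 0 ≤ kv.1.1 ∧ kv.1.1 < n ∧ 0 ≤ kv.1.2 ∧ kv.1.2 < n then
      br.modify kv.1.1 PySem.Dict.empty (fun m => m.insert kv.1.2 kv.2)
    else br) PySem.Dict.empty

theorem pvByRow_eq (n : Int) (d : PySem.Dict (Int × Int) String) :
    pvByRow n d = pvByRowL n d.items := rfl

theorem pvConcat_append (xs ys : List String) :
    pvConcat (xs ++ ys) = pvConcat xs ++ pvConcat ys := by
  induction xs with
  | nil => simp [pvConcat]
  | cons a t ih => simp [pvConcat, ih, String.append_assoc]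

theorem pvConcat_replicate_succ (m : Nat) (s : String) :
    pvConcat (List.replicate (m + 1) s) = pvConcat (List.replicate m s) ++ s := by
  induction m with
  | zero => simp [pvConcat]
  | succ k ih =>
    have hdef : pvConcat (List.replicate (k + 1) s) = s ++ pvConcat (List.replicate k s) := by
      rw [List.replicate_succ]; rfl
    calc pvConcat (List.replicate (k + 1 + 1) s)
        = s ++ pvConcat (List.replicate (k + 1) s) := by rw [List.replicate_succ]; rfl
      _ = s ++ (pvConcat (List.replicate k s) ++ s) := by rw [ih]
      _ = (s ++ pvConcat (List.replicate k s)) ++ s := by rw [String.append_assoc]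
      _ = pvConcat (List.replicate (k + 1) s) ++ s := by rw [hdef]

theorem pvBlank_succ (x : Int) (hx : 0 ≤ x) : pvBlank (x + 1) = pvBlank x ++ "   |" := by
  have h : (x + 1).toNat = x.toNat + 1 := by omega
  rw [pvBlank, pvBlank, h, pvConcat_replicate_succ]

theorem pvBlank_zero : pvBlank 0 = "" := rfl

-- a loop appending a string per element is the initial string followed by the concatenation
theorem pv_foldl_str {α : Type} (l : List α) (h : α → String) :
    ∀ s0 : String, l.foldl (fun rc x => rc ++ h x) s0 = s0 ++ pvConcat (l.map h) := by
  induction l with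
  | nil => intro s0; simp [pvConcat]
  | cons a t ih => intro s0; simp [pvConcat, ih, String.append_assoc]

theorem pvDict_nodup (es : List (Int × Int × String)) : (pvDict es).keys.Nodup :=
  PySem.Dict.nodup_keys_ofList _

-- one grouping step, seen from row r's inner dict
theorem pvM_append (n : Int) (l : List ((Int × Int) × String)) (e : (Int × Int) × String) (r : Int) :
    (pvByRowL n (l ++ [e])).getD r PySem.Dict.empty =
      if (0 ≤ e.1.1 ∧ e.1.1 < n ∧ 0 ≤ e.1.2 ∧ e.1.2 < n) ∧ e.1.1 = r then
        ((pvByRowL n l).getD r PySem.Dict.empty).insert e.1.2 e.2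
      else (pvByRowL n l).getD r PySem.Dict.empty := by
  unfold pvByRowL
  rw [List.foldl_append, List.foldl_cons, List.foldl_nil]
  set br := l.foldl (fun br kv =>
    if 0 ≤ kv.1.1 ∧ kv.1.1 < n ∧ 0 ≤ kv.1.2 ∧ kv.1.2 < n then
      br.modify kv.1.1 PySem.Dict.empty (fun m => m.insert kv.1.2 kv.2)
    else br) (PySem.Dict.empty : PySem.Dict Int (PySem.Dict Int String))
  by_cases hP : 0 ≤ e.1.1 ∧ e.1.1 < n ∧ 0 ≤ e.1.2 ∧ e.1.2 < n
  · rw [if_pos hP, PySem.Dict.getD_modify]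
    by_cases hr : e.1.1 = r
    · subst hr; rw [if_pos rfl, if_pos ⟨hP, rfl⟩]
    · rw [if_neg (fun h => hr h.symm), if_neg (fun h => hr h.2)]
  · rw [if_neg hP, if_neg (fun h => hP h.1)]

-- what row r's inner dict answers for column c, over any item-list prefix
theorem pvM_get? (n : Int) (l : List ((Int × Int) × String)) (r c : Int) :
    ((pvByRowL n l).getD r PySem.Dict.empty).get? c =
      if 0 ≤ r ∧ r < n ∧ 0 ≤ c ∧ c < n then pvFind l (r, c) else none := by
  induction l using List.reverseRecOn with
  | nil =>
    simp [pvByRowL, pvFind, PySem.Dict.getD_empty, PySem.Dict.get?_empty]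
  | append_singleton t e ih =>
    rcases e with ⟨⟨a, b⟩, v⟩
    have hfind : pvFind (t ++ [((a, b), v)]) (r, c) =
        if a = r ∧ b = c then some v else pvFind t (r, c) := by
      simp only [pvFind, List.foldl_append, List.foldl_cons, List.foldl_nil, Prod.mk.injEq]
    rw [pvM_append]
    dsimp only
    by_cases hP : (0 ≤ a ∧ a < n ∧ 0 ≤ b ∧ b < n) ∧ a = r
    · rw [if_pos hP, PySem.Dict.get?_insert, ih, hfind]
      split_ifs <;> first | rfl | omega
    · rw [if_neg hP, ih, hfind]
      split_ifs <;> first | rfl | omega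

-- the inner dict's keys stay duplicate-free
theorem pvM_nodup (n : Int) (l : List ((Int × Int) × String)) (r : Int) :
    (((pvByRowL n l).getD r PySem.Dict.empty).keys).Nodup := by
  induction l using List.reverseRecOn with
  | nil => simp [pvByRowL, PySem.Dict.getD_empty, PySem.Dict.keys_empty]
  | append_singleton t e ih =>
    rw [pvM_append]
    split
    · exact PySem.Dict.nodup_keys_insert _ _ _ ih
    · exact ih

-- last-match lookup over untouched keys
theorem pvFind_not_mem (l : List ((Int × Int) × String)) (k : Int × Int)
    (h : k ∉ l.map Prod.fst) : ∀ init : Option String,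
      l.foldl (fun acc kv => if kv.1 = k then some kv.2 else acc) init = init := by
  induction l with
  | nil => intro init; rfl
  | cons kv t ih =>
    intro init
    simp only [List.map_cons, List.mem_cons, not_or] at h
    rw [List.foldl_cons, if_neg (fun he => h.1 he.symm)]
    exact ih h.2 init

-- last-match lookup finds the unique entry of a duplicate-free item list
theorem pvFind_of_mem (l : List ((Int × Int) × String)) (k : Int × Int) (v : String)
    (hnd : (l.map Prod.fst).Nodup) (hmem : (k, v) ∈ l) : pvFind l k = some v := by
  induction l using List.reverseRecOn with
  | nil => simp at hmem
  | append_singleton t e ih =>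
    have hfind : pvFind (t ++ [e]) k = if e.1 = k then some e.2 else pvFind t k := by
      simp only [pvFind, List.foldl_append, List.foldl_cons, List.foldl_nil]
    rw [List.map_append, List.nodup_append] at hnd
    rcases List.mem_append.mp hmem with h1 | h2
    · have hkmem : k ∈ t.map Prod.fst := List.mem_map.mpr ⟨(k, v), h1, rfl⟩
      have hek : ¬ e.1 = k := by
        intro he
        exact hnd.2.2 k hkmem e.1 (by simp) he.symm
      rw [hfind, if_neg hek]
      exact ih hnd.1 h1
    · have h2' : (k, v) = e := by simpa using h2
      rw [hfind, ← h2']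
      simp

-- on a duplicate-free item list, last-match lookup is the dict's own lookup
theorem pvFind_items (D : PySem.Dict (Int × Int) String) (hnd : D.keys.Nodup) (k : Int × Int) :
    pvFind D.items k = D.get? k := by
  have hkeys : D.keys = D.items.map Prod.fst := by simp [PySem.Dict.keys]
  cases hD : D.get? k with
  | none =>
    have hk : k ∉ D.keys := (PySem.Dict.get?_eq_none_iff_not_mem_keys D k).mp hD
    rw [hkeys] at hk
    exact pvFind_not_mem D.items k hk none
  | some v =>
    exact pvFind_of_mem D.items k v (hkeys ▸ hnd) (PySem.Dict.mem_items_of_get?_eq_some D hD)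

-- the sorted column list of row r is the increasing list of occupied columns
theorem pv_sorted_cols (N : Nat) (d : PySem.Dict (Int × Int) String) (hnd : d.keys.Nodup)
    (r : Int) (hr : 0 ≤ r ∧ r < (N : Int)) :
    PySem.List.sorted (((pvByRow (N : Int) d).getD r PySem.Dict.empty).keys) (fun x => x) =
      ((List.range N).filter (fun c : Nat => d.contains (r, (c : Int)))).map (fun c : Nat => (c : Int)) := by
  have hnodup_m : (((pvByRow (N : Int) d).getD r PySem.Dict.empty).keys).Nodup := by
    rw [pvByRow_eq]; exact pvM_nodup _ _ _
  have hnodup_cols :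
      (((List.range N).filter (fun c : Nat => d.contains (r, (c : Int)))).map (fun c : Nat => (c : Int))).Nodup :=
    List.Nodup.map (fun a b h => by omega) (List.Nodup.filter _ List.nodup_range)
  apply PySem.List.sorted_eq_of_perm_of_pairwise_lt
  · rw [List.perm_ext_iff_of_nodup hnodup_cols hnodup_m]
    intro c
    have hmemkeys : c ∈ ((pvByRow (N : Int) d).getD r PySem.Dict.empty).keys ↔
        ¬ ((pvByRow (N : Int) d).getD r PySem.Dict.empty).get? c = none := by
      rw [PySem.Dict.get?_eq_none_iff_not_mem_keys]; tauto
    have hget : ((pvByRow (N : Int) d).getD r PySem.Dict.empty).get? c =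
        if 0 ≤ r ∧ r < (N : Int) ∧ 0 ≤ c ∧ c < (N : Int) then d.get? (r, c) else none := by
      rw [pvByRow_eq, pvM_get?]
      split_ifs with h
      · rw [pvFind_items d hnd]
      · rfl
    rw [hmemkeys, hget]
    constructor
    · intro h
      obtain ⟨cn, hcn, hcast⟩ := List.mem_map.mp h
      obtain ⟨hcr, hcont⟩ := List.mem_filter.mp hcn
      have hcN := List.mem_range.mp hcr
      have hInR : 0 ≤ r ∧ r < (N : Int) ∧ 0 ≤ c ∧ c < (N : Int) := by omega
      rw [if_pos hInR]
      have hc : ((cn : Nat) : Int) = c := hcast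
      rw [← hc]
      rw [PySem.Dict.contains_eq_isSome_get?] at hcont
      intro hnone
      rw [hnone] at hcont
      simp at hcont
    · intro h
      by_cases hInR : 0 ≤ r ∧ r < (N : Int) ∧ 0 ≤ c ∧ c < (N : Int)
      · rw [if_pos hInR] at h
        refine List.mem_map.mpr ⟨c.toNat, List.mem_filter.mpr ⟨List.mem_range.mpr (by omega), ?_⟩, by omega⟩
        have hc : ((c.toNat : Nat) : Int) = c := by omega
        rw [hc, PySem.Dict.contains_eq_isSome_get?]
        cases hg : d.get? (r, c) with
        | none => exact absurd hg h
        | some v => rfl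
      · rw [if_neg hInR] at h
        exact absurd rfl h
  · exact List.Pairwise.map _ (fun a b h => by omega)
      (List.Pairwise.filter _ List.pairwise_lt_range)

-- gap-filling loop: blanks between sorted occupied columns reconstitute every cell in order
theorem pv_gap (p : Nat → Bool) (g : Nat → String) :
    ∀ (k a q : Nat) (parts : List String), q ≤ a →
      pvConcat ((((List.range' a k).filter p).foldl
          (fun (acc : List String × Int) (c : Nat) =>
            (acc.1 ++ [pvBlank ((c : Int) - acc.2), g c], (c : Int) + 1)) (parts, (q : Int))).1 ++
        [pvBlank (((a + k : Nat) : Int) -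
          (((List.range' a k).filter p).foldl
          (fun (acc : List String × Int) (c : Nat) =>
            (acc.1 ++ [pvBlank ((c : Int) - acc.2), g c], (c : Int) + 1)) (parts, (q : Int))).2)])
      = pvConcat parts ++ pvBlank ((a : Int) - (q : Int)) ++
          pvConcat ((List.range' a k).map (fun c => if p c then g c else "   |")) := by
  intro k
  induction k with
  | zero =>
    intro a q parts hq
    simp only [List.range'_zero, List.filter_nil, List.foldl_nil, List.map_nil, Nat.add_zero]
    rw [pvConcat_append]
    simp [pvConcat]
  | succ k ih =>
    intro a q parts hq
    rw [List.range'_succ]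
    by_cases hpa : p a
    · rw [List.filter_cons_of_pos hpa, List.foldl_cons]
      have hstep : ((parts, (q : Int)).1 ++ [pvBlank ((a : Int) - (parts, (q : Int)).2), g a], ((a : Int) + 1))
          = (parts ++ [pvBlank ((a : Int) - (q : Int)), g a], (((a + 1 : Nat) : Nat) : Int)) := by
        rw [Prod.mk.injEq]
        exact ⟨rfl, by push_cast; ring⟩
      rw [hstep]
      have hN : a + (k + 1) = (a + 1) + k := by omega
      rw [hN, ih (a + 1) (a + 1) _ (le_refl _)]
      rw [pvConcat_append]
      have hz : ((a + 1 : Nat) : Int) - ((a + 1 : Nat) : Int) = 0 := by ring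
      rw [hz, pvBlank_zero]
      simp only [List.map_cons, if_pos hpa, pvConcat, String.append_assoc]
      simp
    · rw [List.filter_cons_of_neg hpa]
      have hN : a + (k + 1) = (a + 1) + k := by omega
      rw [hN, ih (a + 1) q _ (by omega)]
      have hblank : pvBlank (((a + 1 : Nat) : Int) - (q : Int)) =
          pvBlank ((a : Int) - (q : Int)) ++ "   |" := by
        have h1 : (((a + 1 : Nat)) : Int) - (q : Int) = ((a : Int) - (q : Int)) + 1 := by push_cast; ring
        rw [h1, pvBlank_succ _ (by omega)]
      rw [hblank]
      simp only [List.map_cons, if_neg hpa, pvConcat, String.append_assoc]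

-- B's row line equals the label followed by A's cells in column order
theorem pvB_rowline (N : Nat) (d : PySem.Dict (Int × Int) String) (hnd : d.keys.Nodup)
    (r : Int) (hr : 0 ≤ r ∧ r < (N : Int)) :
    pvRowLine (N : Int) r ((pvByRow (N : Int) d).getD r PySem.Dict.empty) =
      pvPad3 r ++ "|" ++ pvConcat ((List.range N).map (fun c => pvCell d r ((c : Nat) : Int))) := by
  unfold pvRowLine
  rw [pv_sorted_cols N d hnd r hr, List.foldl_map]
  set m := (pvByRow (N : Int) d).getD r PySem.Dict.empty with hm
  have hrange : List.range N = List.range' 0 N := by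
    rw [List.range_eq_range']
  rw [hrange]
  have := pv_gap (fun c : Nat => d.contains (r, (c : Int)))
      (fun c => " " ++ m.getD ((c : Nat) : Int) "" ++ " |") N 0 0 [pvPad3 r ++ "|"] (le_refl 0)
  simp only [Nat.zero_add, Nat.cast_zero, sub_zero] at this
  rw [this, pvBlank_zero]
  have hcells : ∀ c ∈ List.range' 0 N,
      (if d.contains (r, (c : Int)) then " " ++ m.getD ((c : Nat) : Int) "" ++ " |" else "   |")
        = pvCell d r ((c : Nat) : Int) := by
    intro c hc
    have hcN : c < N := by
      have := List.mem_range'_1.mp hc; omega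
    have hInR : 0 ≤ r ∧ r < (N : Int) ∧ 0 ≤ ((c : Nat) : Int) ∧ ((c : Nat) : Int) < (N : Int) := by
      constructor; · exact hr.1
      constructor; · exact hr.2
      constructor; · omega
      · omega
    have hget : m.get? ((c : Nat) : Int) = d.get? (r, ((c : Nat) : Int)) := by
      rw [hm, pvByRow_eq, pvM_get?, if_pos hInR, pvFind_items d hnd]
    unfold pvCell
    by_cases hcont : d.contains (r, ((c : Nat) : Int))
    · rw [if_pos hcont, if_pos hcont]
      have hgD : m.getD ((c : Nat) : Int) "" = d.getD (r, ((c : Nat) : Int)) "" := by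
        simp [PySem.Dict.getD, hget]
      rw [hgD]
    · rw [if_neg hcont, if_neg hcont]
  rw [List.map_congr_left hcells]
  simp [pvConcat, String.append_assoc]

-- A's row loop body is the label followed by the cells in column order
theorem pvA_rowline (N : Nat) (d : PySem.Dict (Int × Int) String) (r : Int) :
    (List.range N).foldl (fun rc (c : Nat) =>
        if d.contains (r, ((c : Nat) : Int)) then
          rc ++ (" " ++ d.getD (r, ((c : Nat) : Int)) "" ++ " |")
        else rc ++ "   |") (pvPad3 r ++ "|")
      = pvPad3 r ++ "|" ++ pvConcat ((List.range N).map (fun c => pvCell d r ((c : Nat) : Int))) := by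
  have hb : (fun rc (c : Nat) =>
        if d.contains (r, ((c : Nat) : Int)) then
          rc ++ (" " ++ d.getD (r, ((c : Nat) : Int)) "" ++ " |")
        else rc ++ "   |")
      = fun rc (c : Nat) => rc ++ pvCell d r ((c : Nat) : Int) := by
    funext rc c
    unfold pvCell
    split <;> rfl
  rw [hb, pv_foldl_str, String.append_assoc]

theorem pv_range_up (m : Int) :
    PySem.List.pyRange 0 m 1 = (List.range m.toNat).map (fun (k : Nat) => (k : Int)) := by
  rw [PySem.List.pyRange_one]
  simp only [Int.sub_zero]
  exact List.map_congr_left (fun a _ => by simp)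

theorem pv_range_down (m : Int) :
    PySem.List.pyRange (m - 1) (-1) (-1) = ((List.range m.toNat).map (fun (k : Nat) => (k : Int))).reverse := by
  rw [PySem.List.pyRange_neg_one_eq_reverse, ← pv_range_up]
  norm_num

-- ===== VERDICT (by name: the statement is the Claim_ definition above) =====
theorem generate_expected_full_map_spec : Claim_equal_generate_expected_full_map := by
  intro ms es _
  unfold Spec_generate_expected_full_map
  simp only [generate_expected_full_map, generate_expected_full_map_alt]
  have hn : (if ms > 0 then ms else 0) = ((ms.toNat : Nat) : Int) := by
    split <;> omega
  rw [hn]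
  set N := ms.toNat with hN
  have htoNat : (((N : Nat) : Int)).toNat = N := by omega
  rw [htoNat]
  set d := pvDict es with hd
  have hup : PySem.List.pyRange 0 ((N : Nat) : Int) 1 = PySem.List.pyRange 0 ms 1 := by
    rw [pv_range_up, pv_range_up, htoNat, hN]
  have hdown : PySem.List.pyRange (((N : Nat) : Int) - 1) (-1) (-1)
      = PySem.List.pyRange (ms - 1) (-1) (-1) := by
    rw [pv_range_down, pv_range_down, htoNat, hN]
  rw [hup, hdown]
  congr 1
  congr 1
  rw [pv_range_down, ← List.map_reverse, List.foldl_map, List.foldl_map]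
  apply PySem.List.foldl_congr_mem'
  intro r hrmem acc
  rw [List.mem_reverse, List.mem_range] at hrmem
  have hr : 0 ≤ ((r : Nat) : Int) ∧ ((r : Nat) : Int) < ((N : Nat) : Int) := by omega
  rw [pv_range_up, List.foldl_map]
  rw [pvA_rowline N d ((r : Nat) : Int)]
  rw [pvB_rowline N d (hd ▸ pvDict_nodup es) ((r : Nat) : Int) hr]
  simp [List.append_assoc]
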